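-- pv_equiv track=rewrite | github.com/errbufferoverfl/warring-mill | 06-custom-customs.py | standardise_puzzle
-- ===== SOURCE A (Python) =====
-- def standardise_puzzle(lines: list) -> list[list[str]]:
--     standardised_puzzle = list()
--     batch = list()
--
--     for line in lines:
--         if line != '':
--             batch.append(line)
--         else:
--             standardised_batch = ' '.join(batch).split(' ')
--             standardised_puzzle.append(standardised_batch)
--             batch = list()
--
--     return standardised_puzzle
-- ===== SOURCE B (Python) =====
-- def standardise_puzzle(lines: list) -> list[list[str]]:
--     # Separator-search decomposition: repeatedly find the next empty line and
--     # slice out the segment since the cursor, instead of accumulating a batch.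
--     standardised_puzzle = []
--     prev = 0
--     while True:
--         try:
--             idx = lines.index('', prev)
--         except ValueError:
--             # no further separator: any unterminated tail batch is dropped
--             return standardised_puzzle
--         standardised_puzzle.append(' '.join(lines[prev:idx]).split(' '))
--         prev = idx + 1
-- ===== Notes on version B (the rewrite author's own statement) =====
-- stated objective: alternative
-- what changed: Replaces A's flush-on-empty accumulating pass (growing a batch list line by line) with a cursor loop that searches for the next separator with list.index and slices the segment lines[prev:idx] directly.
import Mathlib
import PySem

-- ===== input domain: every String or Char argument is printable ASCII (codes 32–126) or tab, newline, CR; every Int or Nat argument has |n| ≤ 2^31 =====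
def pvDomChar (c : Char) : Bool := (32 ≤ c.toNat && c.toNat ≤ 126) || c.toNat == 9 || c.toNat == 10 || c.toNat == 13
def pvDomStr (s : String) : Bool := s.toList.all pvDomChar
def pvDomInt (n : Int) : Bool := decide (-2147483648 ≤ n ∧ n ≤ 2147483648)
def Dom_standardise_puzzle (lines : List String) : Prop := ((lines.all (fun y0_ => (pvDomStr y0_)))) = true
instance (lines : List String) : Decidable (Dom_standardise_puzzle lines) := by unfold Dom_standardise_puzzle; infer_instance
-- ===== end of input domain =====

-- B replaces A's flush-on-empty accumulating pass with a cursor loop that searches for the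
-- next separator (list.index) and slices each segment out directly; alternative, not faster.

-- ' '.join(batch).split(' ')  (sep " " is non-empty, so split? is always some)
def pvFlush (batch : List String) : List String :=
  (PySem.Str.split? (PySem.Str.join " " batch) " ").getD []

-- ===== PORT A =====
def standardise_puzzle (lines : List String) : List (List String) :=
  (lines.foldl
    (fun (st : List (List String) × List String) line =>
      if line ≠ "" then (st.1, st.2 ++ [line])
      else (st.1 ++ [pvFlush st.2], []))
    ([], [])).1

-- ===== PORT B =====
-- the while loop of Source B as tail recursion on the cursor `prev`;
-- lines.index('', prev) is ported exactly as prev + (first index of '' in lines.drop prev)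
def pvAltLoop (lines : List String) (out : List (List String)) (prev : Nat) :
    List (List String) :=
  match h : PySem.List.index? (lines.drop prev) "" with
  | none => out
  | some j =>
      pvAltLoop lines
        (out ++ [pvFlush (PySem.List.slice lines (some (prev : Int)) (some ((prev + j : Nat) : Int)))])
        (prev + j + 1)
termination_by lines.length - prev
decreasing_by
  have hj : j < (lines.drop prev).length := by
    obtain ⟨hk, -, -⟩ := PySem.List.getElem_of_index?_eq_some h
    exact hk
  simp [List.length_drop] at hj
  omega

def standardise_puzzle_alt (lines : List String) : List (List String) :=
  pvAltLoop lines [] 0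

-- ===== PRECONDITION & SPEC =====
def Spec_standardise_puzzle (lines : List String) (out : List (List String)) : Prop := out = standardise_puzzle_alt lines
instance (lines : List String) (out : List (List String)) : Decidable (Spec_standardise_puzzle lines out) := by unfold Spec_standardise_puzzle; infer_instance

-- ===== CLAIM (what is proved, stated in full; the proofs are below) =====
def Claim_equal_standardise_puzzle : Prop := ∀ (lines : List String), Dom_standardise_puzzle lines → Spec_standardise_puzzle lines (standardise_puzzle lines)

-- ===== LEMMAS AND PROOFS =====

-- reference recursion: A's loop state collapsed to the remaining input and current batch
def pvCore (batch : List String) : List String → List (List String)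
  | [] => []
  | l :: t => if l = "" then pvFlush batch :: pvCore [] t else pvCore (batch ++ [l]) t

theorem pvA_loop (t : List String) (out : List (List String)) (batch : List String) :
    (t.foldl
      (fun (st : List (List String) × List String) line =>
        if line ≠ "" then (st.1, st.2 ++ [line])
        else (st.1 ++ [pvFlush st.2], []))
      (out, batch)).1 = out ++ pvCore batch t := by
  induction t generalizing out batch with
  | nil => simp [pvCore]
  | cons l t ih =>
      rw [List.foldl_cons]
      by_cases hl : l = ""
      · rw [if_neg (by simp [hl]), ih]
        simp [pvCore, hl, List.append_assoc]
      · rw [if_pos hl, ih]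
        simp [pvCore, hl]

theorem pvCore_no_empty (t : List String) (batch : List String) (h : "" ∉ t) :
    pvCore batch t = [] := by
  induction t generalizing batch with
  | nil => rfl
  | cons l t ih =>
      simp only [List.mem_cons, not_or] at h
      simp [pvCore, Ne.symm h.1, ih _ h.2]

theorem pvCore_prefix (pre : List String) (batch suf : List String) (h : "" ∉ pre) :
    pvCore batch (pre ++ "" :: suf) = pvFlush (batch ++ pre) :: pvCore [] suf := by
  induction pre generalizing batch with
  | nil => simp [pvCore]
  | cons p pre ih =>
      simp only [List.mem_cons, not_or] at h
      simp [pvCore, Ne.symm h.1, ih _ h.2, List.append_assoc]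

theorem pvAltLoop_eq (lines : List String) (prev : Nat) (out : List (List String)) :
    pvAltLoop lines out prev = out ++ pvCore [] (lines.drop prev) := by
  generalize hn : lines.length - prev = n
  induction n using Nat.strong_induction_on generalizing prev out with
  | _ n ih =>
  rw [pvAltLoop]
  split
  next h =>
      rw [pvCore_no_empty _ _ ((PySem.List.index?_eq_none_iff _ _).mp h)]
      simp
  next j h =>
      obtain ⟨pre, suf, hsplit, hlen, hpre⟩ := (PySem.List.index?_eq_some_iff _ _ _).mp h
      have hlen2 : lines.length - prev = j + 1 + suf.length := by
        have h2 := congrArg List.length hsplit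
        simp [List.length_drop, hlen] at h2
        omega
      have hslice : PySem.List.slice lines (some (prev : Int)) (some ((prev + j : Nat) : Int)) = pre := by
        rw [PySem.List.slice_natCast, hsplit]
        simp [hlen]
      have hdrop : lines.drop (prev + j + 1) = suf := by
        have h3 : lines.drop (prev + j + 1) = (lines.drop prev).drop (j + 1) := by
          rw [List.drop_drop]; ring_nf
        rw [h3, hsplit, ← hlen]
        simp
      rw [ih suf.length (by omega) (prev + j + 1) _ (by omega)]
      rw [hslice, hdrop, hsplit, pvCore_prefix _ _ _ hpre]
      simp

-- ===== VERDICT (by name: the statement is the Claim_ definition above) =====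
theorem standardise_puzzle_spec : Claim_equal_standardise_puzzle := by
  intro lines _
  unfold Spec_standardise_puzzle standardise_puzzle standardise_puzzle_alt
  rw [pvAltLoop_eq, pvA_loop]
  simp
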